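-- pv_equiv track=rewrite | github.com/mafrasi2/infdet | util.py | minimize_prefix
-- ===== SOURCE A (Python) =====
-- def rrotate(s, n):
--     n = n % len(s)
--     return s[-n:] + s[:-n]
--
-- def minimize_prefix(prefix, period):
--     while prefix:
--         new_period = prefix[-1] + period[:-1]
--         if new_period == rrotate(period, 1):
--             period = new_period
--             prefix = prefix[:-1]
--         else:
--             break
--     return prefix, period
-- ===== SOURCE B (Python) =====
-- def minimize_prefix(prefix, period):
--     n, L = len(prefix), len(period)
--     k = 0
--     while k < n and prefix[n - 1 - k] == period[(L - 1 - k) % L]: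
--         k += 1
--     r = k % L if L else 0
--     return prefix[:n - k], period[L - r:] + period[:L - r]
-- ===== Notes on version B (the rewrite author's own statement) =====
-- stated objective: faster
-- what changed: A repeatedly rebuilds and compares whole rotated period strings while peeling one prefix char per iteration (O(n*L)); B makes one pass that counts matching chars via modular indexing into the unchanged period and then does a single slice of the prefix and a single rotation slice of the period.
import Mathlib
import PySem

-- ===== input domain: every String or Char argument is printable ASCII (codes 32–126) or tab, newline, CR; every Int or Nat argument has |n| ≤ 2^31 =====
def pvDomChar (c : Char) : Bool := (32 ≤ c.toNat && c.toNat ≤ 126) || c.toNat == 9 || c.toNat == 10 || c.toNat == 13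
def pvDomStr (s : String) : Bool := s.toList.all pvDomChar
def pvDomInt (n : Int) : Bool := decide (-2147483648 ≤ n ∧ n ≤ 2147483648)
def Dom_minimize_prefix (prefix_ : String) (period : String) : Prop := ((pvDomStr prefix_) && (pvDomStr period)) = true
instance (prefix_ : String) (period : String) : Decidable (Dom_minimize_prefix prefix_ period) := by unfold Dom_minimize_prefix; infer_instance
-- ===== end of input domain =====

-- B replaces A's quadratic peel-one-char-and-rotate loop by a single O(n+L) scan that counts
-- matches via modular indexing into the unchanged period, then slices once (objective: faster).

-- ===== PORT A =====
-- rrotate(s, n): n = n % len(s); return s[-n:] + s[:-n]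
def pvRrotate (s : List Char) (n : Int) : List Char :=
  let m := PySem.Int.mod n (s.length : Int)
  PySem.List.slice s (some (-m)) none ++ PySem.List.slice s none (some (-m))

-- the while-loop of A: peel prefix's last char while new_period == rrotate(period, 1)
def pvLoopA (p per : List Char) : List Char × List Char :=
  if hp : p ≠ [] then
    let new_period := [p.getLast hp] ++ per.dropLast
    if new_period = pvRrotate per 1 then
      pvLoopA p.dropLast new_period
    else (p, per)
  else (p, per)
termination_by p.length
decreasing_by
  have := List.length_pos_iff.mpr hp
  simp [List.length_dropLast]; omega

def minimize_prefix (prefix_ : String) (period : String) : String × String :=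
  let r := pvLoopA prefix_.toList period.toList
  (String.ofList r.1, String.ofList r.2)

-- ===== PORT B =====
-- the while-loop of B: count k while prefix[n-1-k] == period[(L-1-k) % L]
def pvCountB (p per : List Char) (n L k : Nat) : Nat :=
  if k < n ∧ p.getD (n - 1 - k) ' ' = per.getD ((PySem.Int.mod ((L : Int) - 1 - (k : Int)) (L : Int)).toNat) ' ' then
    pvCountB p per n L (k + 1)
  else k
termination_by n - k

def minimize_prefix_alt (prefix_ : String) (period : String) : String × String :=
  let p := prefix_.toList
  let per := period.toList
  let n := p.length
  let L := per.length
  let k := pvCountB p per n L 0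
  let r := if L = 0 then 0 else k % L
  (String.ofList (p.take (n - k)), String.ofList (per.drop (L - r) ++ per.take (L - r)))

-- ===== PRECONDITION & SPEC =====
-- Pre_ excludes only the inputs where A raises: nonempty prefix with empty period makes
-- rrotate compute 1 % 0 (ZeroDivisionError); B raises there too.
def Pre_minimize_prefix (prefix_ : String) (period : String) : Prop :=
  prefix_ = "" ∨ period ≠ ""
instance (prefix_ : String) (period : String) : Decidable (Pre_minimize_prefix prefix_ period) := by unfold Pre_minimize_prefix; infer_instance

def pvWitness_minimize_prefix : String × String := ("aba", "ba")

def Spec_minimize_prefix (prefix_ : String) (period : String) (out : String × String) : Prop := out = minimize_prefix_alt prefix_ period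
instance (prefix_ : String) (period : String) (out : String × String) : Decidable (Spec_minimize_prefix prefix_ period out) := by unfold Spec_minimize_prefix; infer_instance

-- ===== CLAIM (what is proved, stated in full; the proofs are below) =====
def Claim_equal_minimize_prefix : Prop := ∀ (prefix_ : String) (period : String), Dom_minimize_prefix prefix_ period → Pre_minimize_prefix prefix_ period → Spec_minimize_prefix prefix_ period (minimize_prefix prefix_ period)

-- ===== LEMMAS AND PROOFS =====

-- rotating right by one is `getLast :: dropLast`
theorem pvRrotate_one (per : List Char) (h : per ≠ []) :
    pvRrotate per 1 = per.getLast h :: per.dropLast := by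
  have hL : 0 < per.length := List.length_pos_iff.mpr h
  rcases Nat.lt_or_ge per.length 2 with h2 | h2
  · -- length 1: 1 % 1 = 0, s[-0:] + s[:-0] = s + []
    obtain ⟨c, rfl⟩ : ∃ c, per = [c] := by
      match per, hL, h2 with
      | [c], _, _ => exact ⟨c, rfl⟩
    simp [pvRrotate, PySem.Int.mod, PySem.List.slice]
  · have hm : PySem.Int.mod 1 (per.length : Int) = 1 := by
      rw [PySem.Int.mod_eq_emod_of_pos (by exact_mod_cast hL)]
      exact Int.emod_eq_of_lt (by norm_num) (by exact_mod_cast h2)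
    simp only [pvRrotate, hm]
    rw [PySem.List.slice_from_neg_one, PySem.List.slice_to_neg_one,
      List.drop_length_sub_one h]
    simp

theorem rotr_eq_rotate (per : List Char) (h : per ≠ []) :
    per.getLast h :: per.dropLast = per.rotate (per.length - 1) := by
  have hL : 0 < per.length := List.length_pos_iff.mpr h
  rw [List.rotate_eq_drop_append_take (by omega), List.drop_length_sub_one h,
    List.dropLast_eq_take]
  simp

theorem pv_getD_rotate (l : List Char) (n i : Nat) (d : Char) (hi : i < l.length) :
    (l.rotate n).getD i d = l.getD ((i + n) % l.length) d := by
  have hlen : (l.rotate n).length = l.length := by simp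
  rw [List.getD_eq_getElem _ _ (by omega), List.getD_eq_getElem _ _ (Nat.mod_lt _ (by omega)),
    List.getElem_rotate]

-- index shift on the period side: indexing the right-rotation at (L-1-k) % L
-- equals indexing the original at (L-1-(k+1)) % L
theorem pv_per_index_shift (per : List Char) (h : per ≠ []) (k : Nat) :
    (per.getLast h :: per.dropLast).getD
        ((PySem.Int.mod ((per.length : Int) - 1 - (k : Int)) (per.length : Int)).toNat) ' '
      = per.getD
        ((PySem.Int.mod ((per.length : Int) - 1 - ((k : Nat) + 1 : Nat)) (per.length : Int)).toNat) ' ' := by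
  have hL : 0 < per.length := List.length_pos_iff.mpr h
  have hLi : (0 : Int) < (per.length : Int) := by exact_mod_cast hL
  rw [PySem.Int.mod_eq_emod_of_pos hLi, PySem.Int.mod_eq_emod_of_pos hLi]
  set L := per.length with hLdef
  set x : Int := (L : Int) - 1 - (k : Int) with hx
  have hcast : ((L : Int) - 1 - ((k + 1 : Nat) : Int)) = x - 1 := by push_cast; ring
  rw [hcast]
  have h0 : (0 : Int) ≤ x % L := Int.emod_nonneg x (by omega)
  have h1 : x % L < L := Int.emod_lt_of_pos x hLi
  have h0' : (0 : Int) ≤ (x - 1) % L := Int.emod_nonneg _ (by omega)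
  have h1' : (x - 1) % L < L := Int.emod_lt_of_pos _ hLi
  have hi : ((x % L).toNat : Int) = x % L := Int.toNat_of_nonneg h0
  have hiL : (x % L).toNat < L := by omega
  rw [rotr_eq_rotate per h]
  rw [pv_getD_rotate per (L - 1) _ ' ' (by omega)]
  have hidx : ((x % L).toNat + (L - 1)) % L = ((x - 1) % L).toNat := by
    have hj : (((x - 1) % L).toNat : Int) = (x - 1) % L := Int.toNat_of_nonneg h0'
    have hcL : ((L - 1 : Nat) : Int) = (L : Int) - 1 := by omega
    have key : ((((x % L).toNat + (L - 1)) % L : Nat) : Int) = (((x - 1) % L).toNat : Int) := by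
      push_cast [hcL, hi, hj]
      rw [Int.emod_add_emod]
      have e1 : x + ((L : Int) - 1) = (x - 1) + (L : Int) * 1 := by ring
      rw [e1, Int.add_mul_emod_self_left]
    exact_mod_cast key
  rw [hidx]

-- the condition of B at k = 0 is "last chars agree"
theorem pvCountB_zero_cond (p per : List Char) (hp : p ≠ []) (hper : per ≠ []) :
    pvCountB p per p.length per.length 0
      = if p.getLast hp = per.getLast hper then pvCountB p per p.length per.length 1 else 0 := by
  have hn : 0 < p.length := List.length_pos_iff.mpr hp
  have hL : 0 < per.length := List.length_pos_iff.mpr hper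
  have hLi : (0 : Int) < (per.length : Int) := by exact_mod_cast hL
  rw [pvCountB]
  have hmod : (PySem.Int.mod ((per.length : Int) - 1 - ((0 : Nat) : Int)) (per.length : Int)).toNat
      = per.length - 1 := by
    rw [PySem.Int.mod_eq_emod_of_pos hLi]
    rw [Nat.cast_zero, sub_zero, Int.emod_eq_of_lt (by omega) (by omega)]
    omega
  rw [hmod, List.getD_eq_getElem p ' ' (by omega), List.getD_eq_getElem per ' ' (by omega)]
  rw [List.getLast_eq_getElem hp, List.getLast_eq_getElem hper]
  simp only [Nat.sub_zero, hn, true_and]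

-- shift lemma: one peeled char and one right-rotation shift B's counter by one
theorem pvCountB_shift (p per : List Char) (hp : p ≠ []) (hper : per ≠ []) (k : Nat) :
    pvCountB p per p.length per.length (k + 1)
      = pvCountB p.dropLast (per.getLast hper :: per.dropLast) (p.length - 1) per.length k + 1 := by
  have hn : 0 < p.length := List.length_pos_iff.mpr hp
  rw [pvCountB]
  conv_rhs => rw [pvCountB]
  rw [← pv_per_index_shift per hper k]
  by_cases hk : k + 1 < p.length
  · have hidx : p.length - 1 - (k + 1) = p.length - 1 - 1 - k := by omega
    have hgetp : p.getD (p.length - 1 - (k + 1)) ' ' = p.dropLast.getD (p.length - 1 - 1 - k) ' ' := by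
      rw [hidx, List.getD_eq_getElem p ' ' (by omega),
        List.getD_eq_getElem p.dropLast ' ' (by simp [List.length_dropLast]; omega),
        List.getElem_dropLast]
    rw [hgetp]
    by_cases hA : p.dropLast.getD (p.length - 1 - 1 - k) ' '
        = (per.getLast hper :: per.dropLast).getD
            ((PySem.Int.mod ((per.length : Int) - 1 - (k : Int)) (per.length : Int)).toNat) ' '
    · rw [if_pos ⟨hk, hA⟩, if_pos ⟨by omega, hA⟩]
      exact pvCountB_shift p per hp hper (k + 1)
    · rw [if_neg (by tauto), if_neg (by tauto)]
  · rw [if_neg (fun hc => absurd hc.1 hk), if_neg (fun hc => absurd hc.1 (by omega))]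
termination_by p.length - k
decreasing_by omega

-- exponent arithmetic for composing rotations
theorem pv_rot_arith (L a k : Nat) (hL : 0 < L) (ha : a = k % L) :
    ((L - 1) + (L - a)) % L = (L - (k + 1) % L) % L := by
  have haL : a < L := ha ▸ Nat.mod_lt _ hL
  rcases Nat.lt_or_ge (a + 1) L with h1 | h1
  · -- (k+1) % L = a + 1
    have hk1 : (k + 1) % L = a + 1 := by
      rw [Nat.add_mod, ← ha]
      rcases Nat.lt_or_ge 1 L with hL2 | hL2
      · rw [Nat.mod_eq_of_lt hL2, Nat.mod_eq_of_lt h1]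
      · omega
    rw [hk1]
    have e1 : (L - 1) + (L - a) = L + (L - 1 - a) := by omega
    rw [e1, Nat.add_mod_left, Nat.mod_eq_of_lt (by omega), Nat.mod_eq_of_lt (by omega)]
    omega
  · -- a = L - 1, so (k+1) % L = 0
    have haeq : a = L - 1 := by omega
    have hk1 : (k + 1) % L = 0 := by
      rw [ha] at haeq
      have h3 := Nat.div_add_mod k L
      have h4 : k + 1 = L * (k / L + 1) := by rw [Nat.mul_add, Nat.mul_one]; omega
      rw [h4, Nat.mul_mod_right]
    rw [hk1, haeq]
    have e1 : (L - 1) + (L - (L - 1)) = L := by omega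
    rw [e1, Nat.mod_self, Nat.sub_zero, Nat.mod_self]

theorem pvLoopA_eq (p per : List Char) (hper : per ≠ []) :
    pvLoopA p per =
      (p.take (p.length - pvCountB p per p.length per.length 0),
       per.drop (per.length - pvCountB p per p.length per.length 0 % per.length)
         ++ per.take (per.length - pvCountB p per p.length per.length 0 % per.length)) := by
  have hL : 0 < per.length := List.length_pos_iff.mpr hper
  rw [pvLoopA]
  by_cases hp : p ≠ []
  · rw [dif_pos hp]
    have hn : 0 < p.length := List.length_pos_iff.mpr hp
    rw [pvRrotate_one per hper]
    have hC := pvCountB_zero_cond p per hp hper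
    by_cases hc : p.getLast hp = per.getLast hper
    · have hcond : ([p.getLast hp] ++ per.dropLast : List Char)
          = per.getLast hper :: per.dropLast := by rw [hc]; rfl
      rw [if_pos hcond, hcond]
      have hper' : (per.getLast hper :: per.dropLast) ≠ [] := by simp
      rw [pvLoopA_eq p.dropLast _ hper']
      have hl1 : p.dropLast.length = p.length - 1 := by simp
      have hl2 : (per.getLast hper :: per.dropLast).length = per.length := by
        simp [List.length_dropLast]; omega
      rw [hl1, hl2]
      have hk : pvCountB p per p.length per.length 0
          = pvCountB p.dropLast (per.getLast hper :: per.dropLast) (p.length - 1) per.length 0 + 1 := by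
        rw [hC, if_pos hc, pvCountB_shift p per hp hper 0]
      rw [hk]
      set k' := pvCountB p.dropLast (per.getLast hper :: per.dropLast) (p.length - 1) per.length 0 with hk'
      refine Prod.ext ?_ ?_
      · show List.take (p.length - 1 - k') p.dropLast = List.take (p.length - (k' + 1)) p
        rw [List.dropLast_eq_take, List.take_take]
        have hmin : min (p.length - 1 - k') (p.length - 1) = p.length - (k' + 1) := by omega
        rw [hmin]
      · show List.drop (per.length - k' % per.length) (per.getLast hper :: per.dropLast) ++
            List.take (per.length - k' % per.length) (per.getLast hper :: per.dropLast)
          = List.drop (per.length - (k' + 1) % per.length) per ++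
            List.take (per.length - (k' + 1) % per.length) per
        rw [rotr_eq_rotate per hper]
        have e1 : ∀ (l : List Char) (m : Nat), m ≤ l.length → l.drop m ++ l.take m = l.rotate m :=
          fun l m h => (List.rotate_eq_drop_append_take h).symm
        rw [e1 (per.rotate (per.length - 1)) _ (by rw [List.length_rotate]; omega), e1 per _ (by omega),
          List.rotate_rotate]
        conv_lhs => rw [← List.rotate_mod]
        conv_rhs => rw [← List.rotate_mod]
        rw [pv_rot_arith per.length (k' % per.length) k' hL rfl]
    · have hne : ¬(([p.getLast hp] ++ per.dropLast : List Char)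
          = per.getLast hper :: per.dropLast) := by
        rw [List.singleton_append]
        intro hEq
        exact hc (by injection hEq)
      rw [if_neg hne, hC, if_neg hc]
      simp
  · rw [dif_neg hp]
    rw [not_not] at hp
    subst hp
    rw [pvCountB]
    simp
termination_by p.length
decreasing_by simp [List.length_dropLast]; omega

-- ===== VERDICT (by name: the statement is the Claim_ definition above) =====
theorem minimize_prefix_spec : Claim_equal_minimize_prefix := by
  intro prefix_ period _ hpre
  simp only [Spec_minimize_prefix, minimize_prefix, minimize_prefix_alt]
  by_cases hper : period.toList = []
  · have hpe : prefix_.toList = [] := by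
      rcases hpre with h | h
      · rw [h]; rfl
      · exact absurd (by simpa using congrArg String.ofList hper) h
    rw [hpe, pvLoopA, pvCountB]
    have hL0 : period.toList.length = 0 := by rw [hper]; rfl
    simp [hL0]
  · rw [pvLoopA_eq prefix_.toList period.toList hper]
    have hne : ¬ (period = "") := fun h => hper (by rw [h]; rfl)
    simp [hne]
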